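-- pv_equiv track=rewrite | github.com/a-shah8/LeetCode | Easy/isSumEqual.py | isSumEqual
-- ===== SOURCE A (Python) =====
-- def isSumEqual(firstWord: str, secondWord: str, targetWord: str) -> bool:
--
--     first, second, third = 0, 0, 0
--
--     for i in firstWord:
--         first = first*10 + (ord(i)-ord('a'))
--
--     for j in secondWord:
--         second = second*10 + (ord(j)-ord('a'))
--
--     for k in targetWord:
--         third = third*10 + (ord(k)-ord('a'))
--
--     return first+second==third
-- ===== SOURCE B (Python) =====
-- def isSumEqual(firstWord: str, secondWord: str, targetWord: str) -> bool:
--     # Column-wise check: never computes the three per-word values; instead aligns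
--     # the words at their right ends and sums the signed column digits
--     # (first + second - target) weighted by their place value, testing for 0.
--     def digit(w, i):
--         return ord(w[len(w) - 1 - i]) - ord('a') if i < len(w) else 0
--
--     total = 0
--     place = 1
--     for i in range(max(len(firstWord), len(secondWord), len(targetWord))):
--         total += (digit(firstWord, i) + digit(secondWord, i) - digit(targetWord, i)) * place
--         place *= 10
--     return total == 0
-- ===== Notes on version B (the rewrite author's own statement) =====
-- stated objective: alternative
-- what changed: Instead of three Horner conversions and a sum comparison, B aligns the three words at their right ends and, in one loop over columns, accumulates the signed column digits (first+second-target) times a running place value, returning whether that signed total is zero.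
import Mathlib
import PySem

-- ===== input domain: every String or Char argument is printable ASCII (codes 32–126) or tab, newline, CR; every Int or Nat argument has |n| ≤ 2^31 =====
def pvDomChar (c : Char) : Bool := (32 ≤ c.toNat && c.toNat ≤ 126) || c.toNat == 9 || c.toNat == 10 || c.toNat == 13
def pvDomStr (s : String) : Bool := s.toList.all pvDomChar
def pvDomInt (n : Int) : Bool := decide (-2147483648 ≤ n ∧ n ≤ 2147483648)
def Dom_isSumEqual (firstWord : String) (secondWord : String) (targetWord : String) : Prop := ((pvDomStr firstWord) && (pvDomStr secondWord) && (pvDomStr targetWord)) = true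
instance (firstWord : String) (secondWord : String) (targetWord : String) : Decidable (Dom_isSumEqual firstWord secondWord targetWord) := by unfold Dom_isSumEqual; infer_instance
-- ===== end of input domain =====

-- B replaces the three per-word Horner conversions by a single column-wise pass: the words are
-- aligned at their right ends and the signed column digits (first+second-target), weighted by
-- the place value 10^i, are accumulated; the result is compared with 0. Same cost.

-- ===== PORT A =====
-- each 'for ch in word: v = v*10 + (ord(ch)-ord('a'))' loop, as a foldl over the word's characters
def pvHorner (word : String) : Int :=
  word.toList.foldl (fun v c => v * 10 + ((c.toNat : Int) - 97)) 0

def isSumEqual (firstWord : String) (secondWord : String) (targetWord : String) : Bool :=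
  let first := pvHorner firstWord
  let second := pvHorner secondWord
  let third := pvHorner targetWord
  decide (first + second = third)

-- ===== PORT B =====
-- Source B's digit(w, i): column digit i (counted from the right end), 0 beyond the word
def pvDigit (w : String) (i : Nat) : Int :=
  let l := w.toList
  if i < l.length then ((l.getD (l.length - 1 - i) 'a').toNat : Int) - 97 else 0

-- Source B's loop over range(max of lengths), accumulating the weighted signed columns
def isSumEqual_alt (firstWord : String) (secondWord : String) (targetWord : String) : Bool :=
  let n := max (max firstWord.toList.length secondWord.toList.length) targetWord.toList.length
  let st := (List.range n).foldl
    (fun (s : Int × Int) i =>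
      (s.1 + (pvDigit firstWord i + pvDigit secondWord i - pvDigit targetWord i) * s.2, s.2 * 10))
    (0, 1)
  decide (st.1 = 0)

-- ===== PRECONDITION & SPEC =====
def Spec_isSumEqual (firstWord : String) (secondWord : String) (targetWord : String) (out : Bool) : Prop := out = isSumEqual_alt firstWord secondWord targetWord
instance (firstWord : String) (secondWord : String) (targetWord : String) (out : Bool) : Decidable (Spec_isSumEqual firstWord secondWord targetWord out) := by unfold Spec_isSumEqual; infer_instance

-- ===== CLAIM (what is proved, stated in full; the proofs are below) =====
def Claim_equal_isSumEqual : Prop := ∀ (firstWord : String) (secondWord : String) (targetWord : String), Dom_isSumEqual firstWord secondWord targetWord → Spec_isSumEqual firstWord secondWord targetWord (isSumEqual firstWord secondWord targetWord)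

-- ===== LEMMAS AND PROOFS =====

-- little-endian reference value: head digit has place 0
def pvLE : List Char → Int
  | [] => 0
  | c :: l => ((c.toNat : Int) - 97) + 10 * pvLE l

theorem pvLE_append_singleton (l : List Char) (c : Char) :
    pvLE (l ++ [c]) = pvLE l + ((c.toNat : Int) - 97) * 10 ^ l.length := by
  induction l with
  | nil => simp [pvLE]
  | cons d l ih => simp [pvLE, ih, pow_succ]; ring

theorem pvA_loop (l : List Char) (acc : Int) :
    l.foldl (fun v c => v * 10 + ((c.toNat : Int) - 97)) acc
      = acc * 10 ^ l.length + pvLE l.reverse := by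
  induction l generalizing acc with
  | nil => simp [pvLE]
  | cons c l ih =>
    simp [List.foldl, ih, pvLE_append_singleton, pow_succ]
    ring

-- the column digit seen from the little-endian (reversed) list
def pvCoeff (lr : List Char) (i : Nat) : Int :=
  if i < lr.length then ((lr.getD i 'a').toNat : Int) - 97 else 0

theorem pvDigit_eq_coeff (w : String) (i : Nat) :
    pvDigit w i = pvCoeff w.toList.reverse i := by
  show (if i < w.toList.length then _ else _) = (if i < w.toList.reverse.length then _ else _)
  by_cases h : i < w.toList.length
  · simp only [List.length_reverse, h, if_pos]
    rw [List.getD_eq_getElem _ _ (by omega), List.getD_eq_getElem _ _ (by simpa using h),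
      List.getElem_reverse]
  · rw [if_neg h, if_neg (by simpa using h)]

theorem pvCoeff_sum (lr : List Char) (n : Nat) (h : lr.length ≤ n) :
    (∑ i ∈ Finset.range n, pvCoeff lr i * 10 ^ i) = pvLE lr := by
  induction lr generalizing n with
  | nil => simp [pvCoeff, pvLE]
  | cons c lr ih =>
    obtain ⟨m, rfl⟩ : ∃ m, n = m + 1 := ⟨n - 1, by simp at h; omega⟩
    rw [Finset.sum_range_succ']
    have hcoeff : ∀ i, pvCoeff (c :: lr) (i + 1) = pvCoeff lr i := by
      intro i; unfold pvCoeff; simp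
    have h0 : pvCoeff (c :: lr) 0 = ((c.toNat : Int) - 97) := by simp [pvCoeff]
    calc (∑ i ∈ Finset.range m, pvCoeff (c :: lr) (i + 1) * 10 ^ (i + 1)) + pvCoeff (c :: lr) 0 * 10 ^ 0
        = (∑ i ∈ Finset.range m, 10 * (pvCoeff lr i * 10 ^ i)) + ((c.toNat : Int) - 97) := by
          rw [h0]; simp only [hcoeff, pow_succ, pow_zero, mul_one]; congr 1; apply Finset.sum_congr rfl
          intro i _; ring
      _ = pvLE (c :: lr) := by
          rw [← Finset.mul_sum, ih m (by simp at h; omega)]; simp [pvLE]; ring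

theorem pv_fold_sum (f : Nat → Int) (n : Nat) (a : Int) :
    (List.range n).foldl (fun (s : Int × Int) i => (s.1 + f i * s.2, s.2 * 10)) (a, 1)
      = (a + ∑ i ∈ Finset.range n, f i * 10 ^ i, 10 ^ n) := by
  induction n with
  | zero => simp
  | succ m ih =>
    rw [List.range_succ, List.foldl_append, ih]
    simp [Finset.sum_range_succ, pow_succ]
    ring

theorem pvHorner_eq (w : String) (n : Nat) (h : w.toList.length ≤ n) :
    (∑ i ∈ Finset.range n, pvDigit w i * 10 ^ i) = pvHorner w := by
  unfold pvHorner
  rw [pvA_loop]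
  simp only [pvDigit_eq_coeff]
  rw [pvCoeff_sum _ _ (by simpa using h)]
  simp

-- ===== VERDICT (by name: the statement is the Claim_ definition above) =====
theorem isSumEqual_spec : Claim_equal_isSumEqual := by
  intro f s t _
  unfold Spec_isSumEqual isSumEqual isSumEqual_alt
  dsimp only
  set n := max (max f.toList.length s.toList.length) t.toList.length with hn
  rw [pv_fold_sum (fun i => pvDigit f i + pvDigit s i - pvDigit t i) n 0]
  dsimp only
  have expand : (∑ i ∈ Finset.range n, (pvDigit f i + pvDigit s i - pvDigit t i) * 10 ^ i)
      = (∑ i ∈ Finset.range n, pvDigit f i * 10 ^ i)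
        + (∑ i ∈ Finset.range n, pvDigit s i * 10 ^ i)
        - (∑ i ∈ Finset.range n, pvDigit t i * 10 ^ i) := by
    rw [← Finset.sum_add_distrib, ← Finset.sum_sub_distrib]
    apply Finset.sum_congr rfl; intro i _; ring
  rw [expand, pvHorner_eq f n (by omega), pvHorner_eq s n (by omega), pvHorner_eq t n (by omega)]
  simp only [zero_add, decide_eq_decide]
  omega
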